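-- pv_equiv track=rewrite | github.com/possee-org/genai-numpy | examples/example_post_processing.py | extract_new_examples
-- ===== SOURCE A (Python) =====
-- def extract_new_examples(old_string, new_string):
--     min_length = min(len(old_string), len(new_string))
--     for i in range(min_length):
--         if old_string[i] != new_string[i]:
--             return new_string[i:]
--     if len(new_string) > min_length:
--         return new_string[min_length:]
--     return ""
-- ===== SOURCE B (Python) =====
-- def extract_new_examples(old_string, new_string):
--     # Binary search for the common-prefix length: prefix equality is monotone
--     # (equal prefixes of length m imply equal prefixes of every shorter length),
--     # so the largest k <= min(len) with old_string[:k] == new_string[:k] is the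
--     # common prefix length; the answer is new_string from there on.
--     lo, hi = 0, min(len(old_string), len(new_string))
--     while lo < hi:
--         mid = (lo + hi + 1) // 2
--         if old_string[:mid] == new_string[:mid]:
--             lo = mid
--         else:
--             hi = mid - 1
--     return new_string[lo:]
-- ===== Notes on version B (the rewrite author's own statement) =====
-- stated objective: alternative
-- what changed: B binary-searches for the common-prefix length over whole-prefix slice comparisons (exploiting monotonicity of prefix equality) and returns one slice, replacing A's per-character compare-and-early-return loop with trailing length branch.
import Mathlib
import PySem

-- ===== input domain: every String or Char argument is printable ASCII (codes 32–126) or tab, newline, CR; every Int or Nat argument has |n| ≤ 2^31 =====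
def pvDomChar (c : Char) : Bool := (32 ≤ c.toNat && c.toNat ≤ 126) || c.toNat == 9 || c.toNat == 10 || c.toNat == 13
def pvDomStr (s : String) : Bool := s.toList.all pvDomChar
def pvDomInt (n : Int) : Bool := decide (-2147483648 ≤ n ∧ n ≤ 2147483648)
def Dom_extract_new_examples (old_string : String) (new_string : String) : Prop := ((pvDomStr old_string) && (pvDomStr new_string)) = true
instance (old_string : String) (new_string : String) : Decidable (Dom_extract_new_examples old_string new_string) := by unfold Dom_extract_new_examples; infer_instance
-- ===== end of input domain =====

-- B binary-searches the common-prefix length via whole-prefix slice comparisons and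
-- slices once, replacing A's per-character compare-and-early-return loop (alternative).


-- ===== PORT A =====
-- the 'for i in range(min_length)' loop with its early return, then the trailing branch
def pvALoop (o n : List Char) (minLen i : Nat) : String :=
  if _h : i < minLen then
    if PySem.List.pyGet? o (i : Int) ≠ PySem.List.pyGet? n (i : Int) then
      String.ofList (PySem.List.slice n (some (i : Int)) none)
    else
      pvALoop o n minLen (i + 1)
  else
    if n.length > minLen then String.ofList (PySem.List.slice n (some (minLen : Int)) none)
    else ""
termination_by minLen - i

def extract_new_examples (old_string : String) (new_string : String) : String :=
  pvALoop old_string.toList new_string.toList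
    (min old_string.toList.length new_string.toList.length) 0

-- ===== PORT B =====
-- the 'while lo < hi' binary-search loop of Source B
def pvBSearch (o n : List Char) (lo hi : Nat) : String :=
  if _h : lo < hi then
    let mid := (lo + hi + 1) / 2
    if PySem.List.slice o none (some (mid : Int)) = PySem.List.slice n none (some (mid : Int)) then
      pvBSearch o n mid hi
    else
      pvBSearch o n lo (mid - 1)
  else
    String.ofList (PySem.List.slice n (some (lo : Int)) none)
termination_by hi - lo

def extract_new_examples_alt (old_string : String) (new_string : String) : String :=
  pvBSearch old_string.toList new_string.toList
    0 (min old_string.toList.length new_string.toList.length)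

-- ===== PRECONDITION & SPEC =====
def Spec_extract_new_examples (old_string : String) (new_string : String) (out : String) : Prop := out = extract_new_examples_alt old_string new_string
instance (old_string : String) (new_string : String) (out : String) : Decidable (Spec_extract_new_examples old_string new_string out) := by unfold Spec_extract_new_examples; infer_instance

-- ===== CLAIM (what is proved, stated in full; the proofs are below) =====
def Claim_equal_extract_new_examples : Prop := ∀ (old_string : String) (new_string : String), Dom_extract_new_examples old_string new_string → Spec_extract_new_examples old_string new_string (extract_new_examples old_string new_string)

-- ===== LEMMAS AND PROOFS =====

-- common-prefix length, the value both programs drop from new_string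
def pvCpl : List Char → List Char → Nat
  | a :: as, b :: bs => if a = b then pvCpl as bs + 1 else 0
  | _, _ => 0

theorem pvCpl_le (o n : List Char) : pvCpl o n ≤ min o.length n.length := by
  induction o generalizing n with
  | nil => simp [pvCpl]
  | cons a as ih =>
    cases n with
    | nil => simp [pvCpl]
    | cons b bs =>
      rw [pvCpl]
      split_ifs with h
      · have := ih bs; simp; omega
      · omega

theorem pvCpl_take (o n : List Char) : o.take (pvCpl o n) = n.take (pvCpl o n) := by
  induction o generalizing n with
  | nil => simp [pvCpl]
  | cons a as ih =>
    cases n with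
    | nil => simp [pvCpl]
    | cons b bs =>
      rw [pvCpl]
      split_ifs with h
      · simp [h, ih bs]
      · simp

theorem pvCpl_get (o n : List Char) (h : pvCpl o n < min o.length n.length)
    (ho : pvCpl o n < o.length) (hn : pvCpl o n < n.length) :
    o[pvCpl o n] ≠ n[pvCpl o n] := by
  induction o generalizing n with
  | nil => simp at ho
  | cons a as ih =>
    cases n with
    | nil => simp at hn
    | cons b bs =>
      by_cases hc : a = b
      · have hcpl : pvCpl (a :: as) (b :: bs) = pvCpl as bs + 1 := by
          rw [pvCpl]; simp [hc]
        simp only [hcpl] at h ho hn ⊢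
        simp only [List.getElem_cons_succ]
        exact ih bs (by simp at h; omega) (by simp at ho; omega) (by simp at hn; omega)
      · have hcpl : pvCpl (a :: as) (b :: bs) = 0 := by
          rw [pvCpl]; simp [hc]
        simp only [hcpl]
        simpa using hc

-- take k o = take k n  ↔  k ≤ cpl, for k ≤ min length
theorem pvTake_iff (o n : List Char) (k : Nat) (hk : k ≤ min o.length n.length) :
    o.take k = n.take k ↔ k ≤ pvCpl o n := by
  constructor
  · intro h
    by_contra hgt
    push Not at hgt
    have hc := pvCpl_le o n
    have hlt : pvCpl o n < min o.length n.length := by omega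
    have ho : pvCpl o n < o.length := by omega
    have hn : pvCpl o n < n.length := by omega
    have := pvCpl_get o n hlt ho hn
    apply this
    have h1 : (o.take k)[pvCpl o n]'(by simp; omega) = o[pvCpl o n] := by
      simp [List.getElem_take]
    have h2 : (n.take k)[pvCpl o n]'(by simp; omega) = n[pvCpl o n] := by
      simp [List.getElem_take]
    rw [← h1, ← h2]
    simp only [h]
  · intro h
    have := pvCpl_take o n
    calc o.take k = (o.take (pvCpl o n)).take k := by rw [List.take_take, Nat.min_eq_left h]
    _ = (n.take (pvCpl o n)).take k := by rw [this]
    _ = n.take k := by rw [List.take_take, Nat.min_eq_left h]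

theorem pvBSearch_eq (o n : List Char) (lo hi : Nat)
    (h1 : lo ≤ pvCpl o n) (h2 : pvCpl o n ≤ hi) (h3 : hi ≤ min o.length n.length) :
    pvBSearch o n lo hi = String.ofList (n.drop (pvCpl o n)) := by
  rw [pvBSearch]
  by_cases h : lo < hi
  · simp only [h, dif_pos]
    have hmid1 : lo < (lo + hi + 1) / 2 := by omega
    have hmid2 : (lo + hi + 1) / 2 ≤ hi := by omega
    rw [PySem.List.slice_to_natCast, PySem.List.slice_to_natCast]
    by_cases he : o.take ((lo + hi + 1) / 2) = n.take ((lo + hi + 1) / 2)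
    · rw [if_pos he]
      have := (pvTake_iff o n _ (by omega)).mp he
      exact pvBSearch_eq o n _ hi this h2 h3
    · rw [if_neg he]
      have : ¬ ((lo + hi + 1) / 2 ≤ pvCpl o n) := fun hle =>
        he ((pvTake_iff o n _ (by omega)).mpr hle)
      exact pvBSearch_eq o n lo _ h1 (by omega) (by omega)
  · have hlo : lo = pvCpl o n := by omega
    rw [dif_neg h, PySem.List.slice_from_natCast, hlo]
termination_by hi - lo

theorem pvALoop_eq (o n : List Char) (i : Nat) (hi : i ≤ min o.length n.length) :
    pvALoop o n (min o.length n.length) i =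
      String.ofList (n.drop (i + pvCpl (o.drop i) (n.drop i))) := by
  by_cases h : i < min o.length n.length
  · have ho : i < o.length := by omega
    have hn : i < n.length := by omega
    have hgo : PySem.List.pyGet? o (i : Int) = some o[i] := by
      simp [PySem.List.pyGet?_natCast, List.getElem?_eq_getElem ho]
    have hgn : PySem.List.pyGet? n (i : Int) = some n[i] := by
      simp [PySem.List.pyGet?_natCast, List.getElem?_eq_getElem hn]
    have hdo : o.drop i = o[i] :: o.drop (i + 1) := List.drop_eq_getElem_cons ho
    have hdn : n.drop i = n[i] :: n.drop (i + 1) := List.drop_eq_getElem_cons hn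
    rw [pvALoop]
    simp only [h, dif_pos, hgo, hgn]
    by_cases hc : o[i] = n[i]
    · simp only [hc, ne_eq, not_true_eq_false, if_false]
      rw [pvALoop_eq o n (i + 1) (by omega)]
      have : pvCpl (o.drop i) (n.drop i) = pvCpl (o.drop (i + 1)) (n.drop (i + 1)) + 1 := by
        rw [hdo, hdn, pvCpl]; simp [hc]
      rw [this]
      ring_nf
    · simp only [ne_eq, Option.some.injEq, hc, not_false_eq_true, if_true]
      have : pvCpl (o.drop i) (n.drop i) = 0 := by
        rw [hdo, hdn, pvCpl]; simp [hc]
      rw [this, PySem.List.slice_from_natCast, Nat.add_zero]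
  · have hie : i = min o.length n.length := by omega
    have hz : pvCpl (o.drop i) (n.drop i) = 0 := by
      rcases Nat.le_total o.length n.length with hle | hle
      · have : o.drop i = [] := by
          apply List.drop_eq_nil_of_le; omega
        rw [this]; cases n.drop i <;> rfl
      · have : n.drop i = [] := by
          apply List.drop_eq_nil_of_le; omega
        rw [this]; cases o.drop i <;> rfl
    rw [pvALoop]
    simp only [h, dif_neg, not_false_eq_true]
    by_cases hn : n.length > min o.length n.length
    · simp only [hn, if_true, PySem.List.slice_from_natCast]
      rw [hz, hie, Nat.add_zero]
    · simp only [hn, if_false]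
      have : n.drop (i + 0) = [] := by
        apply List.drop_eq_nil_of_le; omega
      rw [hz, this]
termination_by min o.length n.length - i

-- ===== VERDICT (by name: the statement is the Claim_ definition above) =====
theorem extract_new_examples_spec : Claim_equal_extract_new_examples := by
  intro old_string new_string _
  unfold Spec_extract_new_examples extract_new_examples extract_new_examples_alt
  rw [pvALoop_eq _ _ 0 (Nat.zero_le _),
      pvBSearch_eq _ _ 0 _ (Nat.zero_le _) (pvCpl_le _ _) (le_refl _)]
  simp
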